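-- pv_equiv track=rewrite | github.com/tasnimjubaier/talent-acquisition-accelerator | agents/sourcing_agent.py | _same_state
-- ===== SOURCE A (Python) =====
-- def _same_state(loc1: str, loc2: str) -> bool:
--     """Check if two locations are in the same state"""
--     # Extract state abbreviations or names
--     states = ["AL", "AK", "AZ", "AR", "CA", "CO", "CT", "DE", "FL", "GA",
--               "HI", "ID", "IL", "IN", "IA", "KS", "KY", "LA", "ME", "MD",
--               "MA", "MI", "MN", "MS", "MO", "MT", "NE", "NV", "NH", "NJ",
--               "NM", "NY", "NC", "ND", "OH", "OK", "OR", "PA", "RI", "SC",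
--               "SD", "TN", "TX", "UT", "VT", "VA", "WA", "WV", "WI", "WY"]
--
--     loc1_upper = loc1.upper()
--     loc2_upper = loc2.upper()
--
--     for state in states:
--         if state in loc1_upper and state in loc2_upper:
--             return True
--
--     return False
-- ===== SOURCE B (Python) =====
-- _STATE_SET = frozenset([
--     "AL", "AK", "AZ", "AR", "CA", "CO", "CT", "DE", "FL", "GA",
--     "HI", "ID", "IL", "IN", "IA", "KS", "KY", "LA", "ME", "MD",
--     "MA", "MI", "MN", "MS", "MO", "MT", "NE", "NV", "NH", "NJ",
--     "NM", "NY", "NC", "ND", "OH", "OK", "OR", "PA", "RI", "SC",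
--     "SD", "TN", "TX", "UT", "VT", "VA", "WA", "WV", "WI", "WY"])
--
--
-- def _codes(loc):
--     """All state codes occurring in loc: scan the uppercased string's
--     two-character windows and keep those that are state codes."""
--     u = loc.upper()
--     return {u[i:i + 2] for i in range(len(u) - 1)} & _STATE_SET
--
--
-- def _same_state(loc1: str, loc2: str) -> bool:
--     """Check if two locations are in the same state"""
--     return not _codes(loc1).isdisjoint(_codes(loc2))
-- ===== Notes on version B (the rewrite author's own statement) =====
-- stated objective: alternative
-- what changed: Instead of looping over the 50 states and substring-searching each in both locations, B scans each uppercased location's two-character windows once, intersects them with a frozenset of state codes, and tests the two resulting code sets for disjointness.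
import Mathlib
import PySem

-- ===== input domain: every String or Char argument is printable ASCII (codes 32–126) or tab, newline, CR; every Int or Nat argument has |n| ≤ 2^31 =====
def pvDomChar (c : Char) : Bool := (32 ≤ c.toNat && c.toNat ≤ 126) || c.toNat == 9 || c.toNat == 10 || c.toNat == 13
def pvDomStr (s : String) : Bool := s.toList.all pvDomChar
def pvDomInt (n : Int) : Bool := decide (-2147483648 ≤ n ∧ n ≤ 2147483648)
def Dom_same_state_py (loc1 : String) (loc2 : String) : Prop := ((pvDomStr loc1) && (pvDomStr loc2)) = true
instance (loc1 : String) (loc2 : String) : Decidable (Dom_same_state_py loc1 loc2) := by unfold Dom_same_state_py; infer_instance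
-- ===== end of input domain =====

-- B scans each uppercased location's two-character windows once, keeps those that are state
-- codes (set intersection with the state set), and tests the two code sets for disjointness —
-- instead of A's loop over the 50 states testing substring containment in both locations.


-- the literal 50-state list A hard-codes (B's frozenset holds the same elements)
def pvStates : List String :=
  ["AL", "AK", "AZ", "AR", "CA", "CO", "CT", "DE", "FL", "GA",
   "HI", "ID", "IL", "IN", "IA", "KS", "KY", "LA", "ME", "MD",
   "MA", "MI", "MN", "MS", "MO", "MT", "NE", "NV", "NH", "NJ",
   "NM", "NY", "NC", "ND", "OH", "OK", "OR", "PA", "RI", "SC",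
   "SD", "TN", "TX", "UT", "VT", "VA", "WA", "WV", "WI", "WY"]

-- ===== PORT A =====
-- A's loop: for state in states: if state in u1 and state in u2: return True; return False
def pvLoopA (u1 u2 : String) : List String → Bool
  | [] => false
  | st :: rest =>
      if PySem.Str.isIn st u1 && PySem.Str.isIn st u2 then true
      else pvLoopA u1 u2 rest

def same_state_py (loc1 : String) (loc2 : String) : Bool :=
  pvLoopA (PySem.Str.upper loc1) (PySem.Str.upper loc2) pvStates

-- ===== PORT B =====
-- B's _STATE_SET (frozenset of the 50 codes)
def pvStateSet : PySem.Set String := PySem.Set.ofList pvStates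

-- B's _codes: {u[i:i+2] for i in range(len(u)-1)} & _STATE_SET
def pvCodes (loc : String) : PySem.Set String :=
  let u := PySem.Str.upper loc
  PySem.Set.inter
    (PySem.Set.ofList ((PySem.List.pyRange 0 ((u.length : Int) - 1) 1).map
      (fun i => PySem.Str.slice u (some i) (some (i + 2)))))
    pvStateSet

def same_state_py_alt (loc1 : String) (loc2 : String) : Bool :=
  !(PySem.Set.isdisjoint (pvCodes loc1) (pvCodes loc2))

-- ===== PRECONDITION & SPEC =====
def Spec_same_state_py (loc1 : String) (loc2 : String) (out : Bool) : Prop := out = same_state_py_alt loc1 loc2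
instance (loc1 : String) (loc2 : String) (out : Bool) : Decidable (Spec_same_state_py loc1 loc2 out) := by unfold Spec_same_state_py; infer_instance

-- ===== CLAIM (what is proved, stated in full; the proofs are below) =====
def Claim_equal_same_state_py : Prop := ∀ (loc1 : String) (loc2 : String), Dom_same_state_py loc1 loc2 → Spec_same_state_py loc1 loc2 (same_state_py loc1 loc2)

-- ===== LEMMAS AND PROOFS =====

-- A's loop is the existence of a state matching both locations
theorem pvLoopA_eq_true_iff (u1 u2 : String) (l : List String) :
    pvLoopA u1 u2 l = true ↔
      ∃ st ∈ l, PySem.Str.isIn st u1 = true ∧ PySem.Str.isIn st u2 = true := by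
  induction l with
  | nil => simp [pvLoopA]
  | cons st rest ih =>
      simp only [pvLoopA]
      split_ifs with h
      · simp_all
      · simp only [Bool.and_eq_true] at h
        simp [ih]
        tauto

-- every hard-coded state code has exactly two characters
theorem pvStates_len2 : ∀ st ∈ pvStates, st.toList.length = 2 := by decide

-- a two-character string is among u's two-character windows iff it is an infix of u
theorem pvMem_windows_iff (u st : String) (hst : st.toList.length = 2) :
    st ∈ (PySem.List.pyRange 0 ((u.length : Int) - 1) 1).map
        (fun i => PySem.Str.slice u (some i) (some (i + 2))) ↔
      st.toList <:+: u.toList := by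
  constructor
  · intro h
    obtain ⟨i, hi, hslice⟩ := List.mem_map.mp h
    rw [PySem.List.mem_pyRange_one] at hi
    obtain ⟨hi0, _⟩ := hi
    obtain ⟨j, rfl⟩ := Int.eq_ofNat_of_zero_le hi0
    have hts : st.toList = (u.toList.drop j).take 2 := by
      rw [← hslice, PySem.Str.toList_slice, PySem.Chars.slice_eq_listSlice]
      have : ((j : Int) + 2) = ((j : Int) + ((2 : Nat) : Int)) := by norm_num
      rw [this, PySem.List.slice_natCast_add]
    rw [hts, List.infix_iff_prefix_suffix]
    exact ⟨u.toList.drop j, List.take_prefix _ _, List.drop_suffix _ _⟩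
  · intro h
    have := (PySem.Chars.exists_prefix_drop_iff_isIn st.toList u.toList).2
      ((PySem.Chars.isIn_iff_infix _ _).2 h)
    obtain ⟨j, hpre⟩ := this
    have hlen : 2 ≤ u.toList.length - j := by
      have h1 := hpre.length_le
      rw [List.length_drop, hst] at h1
      omega
    have hjlt : (j : Int) < (u.length : Int) - 1 := by
      have hu : u.length = u.toList.length := u.length_toList.symm
      omega
    refine List.mem_map.mpr ⟨(j : Int), PySem.List.mem_pyRange_one.mpr ⟨by positivity, hjlt⟩, ?_⟩
    have hts : (u.toList.drop j).take 2 = st.toList := by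
      have := List.prefix_iff_eq_take.mp hpre
      rw [hst] at this
      exact this.symm
    apply String.toList_injective
    rw [PySem.Str.toList_slice, PySem.Chars.slice_eq_listSlice]
    have : ((j : Int) + 2) = ((j : Int) + ((2 : Nat) : Int)) := by norm_num
    rw [this, PySem.List.slice_natCast_add, hts]

-- membership in B's code set
theorem pvMem_codes_iff (loc st : String) (hst : st ∈ pvStates) :
    st ∈ pvCodes loc ↔ PySem.Str.isIn st (PySem.Str.upper loc) = true := by
  unfold pvCodes pvStateSet
  rw [PySem.Set.mem_inter, PySem.Set.mem_ofList, PySem.Set.mem_ofList,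
      pvMem_windows_iff _ _ (pvStates_len2 st hst), PySem.Str.isIn_iff_infix]
  tauto

-- ===== VERDICT (by name: the statement is the Claim_ definition above) =====
theorem same_state_py_spec : Claim_equal_same_state_py := by
  intro loc1 loc2 _
  unfold Spec_same_state_py same_state_py same_state_py_alt
  rw [Bool.eq_iff_iff, pvLoopA_eq_true_iff]
  rw [Bool.not_eq_true', ← Bool.not_eq_true (PySem.Set.isdisjoint _ _), PySem.Set.isdisjoint_iff]
  push Not
  constructor
  · rintro ⟨st, hmem, h1, h2⟩
    exact ⟨st, (pvMem_codes_iff loc1 st hmem).2 h1, (pvMem_codes_iff loc2 st hmem).2 h2⟩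
  · rintro ⟨st, h1, h2⟩
    have hmem : st ∈ pvStates := by
      have := (PySem.Set.mem_inter _ _ _).1 h1
      exact (PySem.Set.mem_ofList _ _).1 this.2
    exact ⟨st, hmem, (pvMem_codes_iff loc1 st hmem).1 h1, (pvMem_codes_iff loc2 st hmem).1 h2⟩
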